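-- pv_equiv track=rewrite | github.com/Ahmed-SamirMohamed/automata_practical-exam-4417 | automata_practical exam 4417/PDA/stack_pda.py | simulate_anbn_stack
-- ===== SOURCE A (Python) =====
-- def simulate_anbn_stack(word):
--     """
--     PDA simulation: accepts strings of aⁿbⁿ using stack logic.
--     """
--
--     stack = []
--     index = 0
--
--     while index < len(word) and word[index] == 'a':
--         stack.append('A')
--         index += 1
--
--     while index < len(word) and word[index] == 'b':
--         if not stack:
--             return "Rejected"
--         stack.pop()
--         index += 1
--
--     return "Accepted" if not stack and index == len(word) else "Rejected"
-- ===== SOURCE B (Python) =====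
-- def simulate_anbn_stack(word):
--     """
--     Stack-free check for a^n b^n: count leading 'a's, then require the rest
--     to be exactly that many 'b's.
--     """
--     k = 0
--     while k < len(word) and word[k] == 'a':
--         k += 1
--     rest = word[k:]
--     return "Accepted" if all(c == 'b' for c in rest) and len(word) - k == k else "Rejected"
-- ===== Notes on version B (the rewrite author's own statement) =====
-- stated objective: simpler
-- what changed: Drops the stack entirely: B counts the leading 'a' run into an integer k and accepts iff the remainder is all 'b' and has length k, instead of simulating PDA pushes/pops.
import Mathlib
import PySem

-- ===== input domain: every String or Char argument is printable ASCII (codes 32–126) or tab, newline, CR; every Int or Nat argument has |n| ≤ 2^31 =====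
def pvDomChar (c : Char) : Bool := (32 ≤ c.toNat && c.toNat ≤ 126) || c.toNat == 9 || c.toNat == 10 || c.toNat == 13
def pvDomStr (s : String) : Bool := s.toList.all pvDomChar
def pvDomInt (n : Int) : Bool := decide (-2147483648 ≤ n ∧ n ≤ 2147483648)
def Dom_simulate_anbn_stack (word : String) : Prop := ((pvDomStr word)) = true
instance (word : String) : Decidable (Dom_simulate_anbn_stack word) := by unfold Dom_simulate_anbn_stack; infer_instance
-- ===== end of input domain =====

-- B replaces A's explicit PDA stack by counting the leading 'a' run and checking the
-- remainder is exactly that many 'b's (objective: simpler).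

-- ===== PORT A =====
-- first while loop: push 'A' for each leading 'a' (stack modelled head-first: push = cons, pop = tail)
def pdaPush : List Char → List Char → (List Char × List Char)
  | [], st => ([], st)
  | c :: cs, st => if c = 'a' then pdaPush cs ('A' :: st) else (c :: cs, st)

-- second while loop: pop per 'b'; none = the mid-loop `return "Rejected"` on empty stack
def pdaPop : List Char → List Char → Option (List Char × List Char)
  | [], st => some ([], st)
  | c :: cs, st =>
    if c = 'b' then
      match st with
      | [] => none
      | _ :: st' => pdaPop cs st'
    else some (c :: cs, st)

def simulate_anbn_stack (word : String) : String :=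
  let p := pdaPush word.toList []
  match pdaPop p.1 p.2 with
  | none => "Rejected"
  | some (rest, st) => if st.isEmpty && rest.isEmpty then "Accepted" else "Rejected"

-- ===== PORT B =====
-- the counting while loop of Source B
def countLeadingA : List Char → Nat
  | [] => 0
  | c :: cs => if c = 'a' then countLeadingA cs + 1 else 0

def simulate_anbn_stack_alt (word : String) : String :=
  let k := countLeadingA word.toList
  let rest := word.toList.drop k
  if rest.all (· = 'b') && (word.toList.length - k == k) then "Accepted" else "Rejected"

-- ===== PRECONDITION & SPEC =====
def Spec_simulate_anbn_stack (word : String) (out : String) : Prop := out = simulate_anbn_stack_alt word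
instance (word : String) (out : String) : Decidable (Spec_simulate_anbn_stack word out) := by unfold Spec_simulate_anbn_stack; infer_instance

-- ===== CLAIM (what is proved, stated in full; the proofs are below) =====
def Claim_equal_simulate_anbn_stack : Prop := ∀ (word : String), Dom_simulate_anbn_stack word → Spec_simulate_anbn_stack word (simulate_anbn_stack word)

-- ===== LEMMAS AND PROOFS =====

theorem countLeadingA_le (cs : List Char) : countLeadingA cs ≤ cs.length := by
  induction cs with
  | nil => simp [countLeadingA]
  | cons c cs ih =>
    simp only [countLeadingA, List.length_cons]
    split <;> omega

theorem pdaPush_eq (cs st : List Char) :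
    pdaPush cs st = (cs.drop (countLeadingA cs), List.replicate (countLeadingA cs) 'A' ++ st) := by
  induction cs generalizing st with
  | nil => simp [pdaPush, countLeadingA]
  | cons c cs ih =>
    simp only [pdaPush, countLeadingA]
    split
    · rw [ih]; simp [List.replicate_succ']
    · simp

theorem pdaPop_accept (rest : List Char) (k : Nat) :
    (match pdaPop rest (List.replicate k 'A') with
     | none => "Rejected"
     | some (r, s) => if s.isEmpty && r.isEmpty then "Accepted" else "Rejected")
    = (if rest.all (· = 'b') && (rest.length == k) then "Accepted" else "Rejected") := by
  induction rest generalizing k with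
  | nil =>
    cases k <;> simp [pdaPop]
  | cons c cs ih =>
    by_cases hc : c = 'b'
    · cases k with
      | zero =>
        simp [pdaPop, hc]
      | succ k' =>
        simp only [pdaPop, hc, List.replicate_succ, if_true]
        rw [ih k']
        simp
    · simp [pdaPop, hc, List.isEmpty_cons]

-- ===== VERDICT (by name: the statement is the Claim_ definition above) =====
theorem simulate_anbn_stack_spec : Claim_equal_simulate_anbn_stack := by
  intro word _
  unfold Spec_simulate_anbn_stack simulate_anbn_stack simulate_anbn_stack_alt
  have h := pdaPush_eq word.toList []
  simp only [List.append_nil] at h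
  simp only [h]
  rw [pdaPop_accept]
  have hle := countLeadingA_le word.toList
  have hlen : (word.toList.drop (countLeadingA word.toList)).length
      = word.toList.length - countLeadingA word.toList := by simp
  rw [hlen]
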